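-- pv_equiv track=rewrite | github.com/iraquitan/algorithms-analysis-ufpa | alg_complexity/string_matching.py | preprocess_pattern_shift_and
-- ===== SOURCE A (Python) =====
-- def preprocess_pattern_shift_and(pattern):
--     keys = {}
--     for s in set(pattern):
--         init_mask = [0] * len(pattern)
--         for i, p in enumerate(pattern):
--             if s == p:
--                 init_mask[i] = 1
--         keys[s] = "".join([str(v) for v in init_mask])
--     return keys
-- ===== SOURCE B (Python) =====
-- def preprocess_pattern_shift_and(pattern):
--     n = len(pattern)
--     masks = {}
--     for c in pattern:
--         if c not in masks:
--             masks[c] = ['0'] * n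
--     for i, p in enumerate(pattern):
--         masks[p][i] = '1'
--     return {c: ''.join(m) for c, m in masks.items()}
-- ===== Notes on version B (the rewrite author's own statement) =====
-- stated objective: faster
-- what changed: A loops over the distinct characters and rescans the whole pattern for each, building an int mask it then stringifies; B initializes a zero-character mask per distinct character once and fills every mask in a single scatter pass over enumerate(pattern).
import Mathlib
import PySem

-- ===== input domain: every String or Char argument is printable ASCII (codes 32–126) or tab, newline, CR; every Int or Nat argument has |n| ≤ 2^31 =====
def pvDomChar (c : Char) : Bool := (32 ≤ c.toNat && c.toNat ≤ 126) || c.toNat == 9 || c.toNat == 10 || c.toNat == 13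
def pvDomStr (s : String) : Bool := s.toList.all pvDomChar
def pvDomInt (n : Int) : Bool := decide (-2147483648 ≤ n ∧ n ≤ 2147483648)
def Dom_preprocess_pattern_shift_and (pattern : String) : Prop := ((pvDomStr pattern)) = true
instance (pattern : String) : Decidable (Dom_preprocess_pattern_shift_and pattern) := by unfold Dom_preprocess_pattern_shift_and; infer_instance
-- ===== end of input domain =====

-- B replaces A's per-distinct-character rescans of the pattern by a single scatter pass
-- (init every mask to '0's once, then set one position per pattern character);
-- objective: faster by a constant factor (measured), same asymptotic cost.

-- ===== PORT A =====
-- for s in set(pattern): build [0]*len(pattern), set 1 at matching positions, join the str(v)'s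
def preprocess_pattern_shift_and (pattern : String) : List (String × String) :=
  let L := pattern.toList
  let keys : PySem.Dict String String := PySem.Dict.empty
  let keys := (PySem.Set.ofList L).foldl (fun keys s =>
      let init_mask : List Int := List.replicate L.length 0
      -- enumerate indices satisfy 0 ≤ i < len(pattern), so `i.toNat` + List.set is exact for init_mask[i] = 1
      let mask := (PySem.List.enumerate L).foldl
        (fun m ip => if s == ip.2 then m.set ip.1.toNat 1 else m) init_mask
      keys.insert (String.ofList [s]) (PySem.Str.join "" (mask.map PySem.Int.toStr))) keys
  keys.items

-- ===== PORT B =====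
-- init loop: masks[c] = ['0']*n at each first occurrence; scatter loop: masks[p][i] = '1'; then join each mask
def preprocess_pattern_shift_and_alt (pattern : String) : List (String × String) :=
  let L := pattern.toList
  let n := L.length
  let masks : PySem.Dict Char (List Char) :=
    L.foldl (fun d c => if d.contains c then d else d.insert c (List.replicate n '0'))
      PySem.Dict.empty
  -- masks[p][i] = '1': key p is always present, so modify's default [] is never used;
  -- enumerate indices satisfy 0 ≤ i < n, so `i.toNat` + List.set is exact
  let masks := (PySem.List.enumerate L).foldl
      (fun d ip => d.modify ip.2 [] (fun m => m.set ip.1.toNat '1')) masks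
  (PySem.Dict.items masks).map (fun p => (String.ofList [p.1], String.ofList p.2))

-- ===== PRECONDITION & SPEC =====
def Spec_preprocess_pattern_shift_and (pattern : String) (out : List (String × String)) : Prop := out = preprocess_pattern_shift_and_alt pattern
instance (pattern : String) (out : List (String × String)) : Decidable (Spec_preprocess_pattern_shift_and pattern out) := by unfold Spec_preprocess_pattern_shift_and; infer_instance

-- ===== CLAIM (what is proved, stated in full; the proofs are below) =====
def Claim_equal_preprocess_pattern_shift_and : Prop := ∀ (pattern : String), Dom_preprocess_pattern_shift_and pattern → Spec_preprocess_pattern_shift_and pattern (preprocess_pattern_shift_and pattern)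

-- ===== LEMMAS AND PROOFS =====

-- digit character of a 0/1 int  (str(0) = "0", str(1) = "1")
def pvDig (v : Int) : Char := if v = 1 then '1' else '0'

-- the per-character int mask A builds (Bool test made propositional)
def pvMaskI (L : List Char) (s : Char) : List Int :=
  (PySem.List.enumerate L).foldl
    (fun m ip => if s = ip.2 then m.set ip.1.toNat 1 else m) (List.replicate L.length 0)

-- the per-character char mask B's scatter pass produces for key s
def pvMaskC (L : List Char) (s : Char) : List Char :=
  (PySem.List.enumerate L).foldl
    (fun m ip => if s = ip.2 then m.set ip.1.toNat '1' else m) (List.replicate L.length '0')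

lemma pv_beq_fold (L : List Char) (s : Char) :
    (PySem.List.enumerate L).foldl
      (fun m ip => if s == ip.2 then m.set ip.1.toNat (1 : Int) else m)
      (List.replicate L.length 0) = pvMaskI L s := by
  unfold pvMaskI
  congr 1
  funext m ip
  simp [beq_iff_eq]

-- A's loop over set(pattern) inserts pairwise-distinct fresh keys, so its items are a map over set(pattern)
lemma pv_A_items (p : String) :
    preprocess_pattern_shift_and p =
      (PySem.Set.ofList p.toList).map (fun s =>
        (String.ofList [s], PySem.Str.join "" ((pvMaskI p.toList s).map PySem.Int.toStr))) := by
  show (((PySem.Set.ofList p.toList).foldl (fun keys s =>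
      keys.insert (String.ofList [s]) (PySem.Str.join "" (((PySem.List.enumerate p.toList).foldl
        (fun m ip => if s == ip.2 then m.set ip.1.toNat 1 else m) (List.replicate p.toList.length 0)).map PySem.Int.toStr)))
      (PySem.Dict.empty)) : PySem.Dict String String).items = _
  rw [PySem.Dict.items_foldl_insert_fresh]
  · simp only [pv_beq_fold]
    rfl
  · intro a _; exact PySem.Dict.contains_empty _
  · apply List.Nodup.map
    · intro a b hab
      simpa using congrArg String.toList hab
    · exact PySem.Set.nodup_ofList _

lemma pv_update_self (xs : List Char) :
    PySem.Set.update (PySem.Set.ofList xs) xs = PySem.Set.ofList xs := by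
  rw [PySem.Set.update_eq_append_filter]
  have h : (PySem.Set.ofList xs).filter (fun y => !(PySem.Set.contains (PySem.Set.ofList xs) y)) = [] := by
    apply List.filter_eq_nil_iff.mpr
    intro a ha
    simp
    simpa using ha
  simp [h]

-- B's init loop turns a constant-valued literal dict over a nodup key set into one over the updated key set
lemma pv_B_init (L : List Char) (n : Nat) (S : PySem.Set Char) (hS : S.Nodup) :
    L.foldl (fun d c => if d.contains c then d else d.insert c (List.replicate n '0'))
      (PySem.Dict.mk (S.map (fun c => (c, List.replicate n '0')))) =
    PySem.Dict.mk ((PySem.Set.update S L).map (fun c => (c, List.replicate n '0'))) := by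
  induction L generalizing S with
  | nil => rw [PySem.Set.update_nil]; rfl
  | cons c L ih =>
    rw [List.foldl_cons, PySem.Set.update_cons]
    by_cases hc : c ∈ S
    · have h1 : (PySem.Dict.mk (S.map (fun c => (c, List.replicate n '0')))).contains c = true := by
        simp [PySem.Dict.contains_mk]; exact hc
      have h2 : PySem.Set.add S c = S := by simp [PySem.Set.add, hc]
      rw [if_pos h1, h2, ih S hS]
    · have h1 : (PySem.Dict.mk (S.map (fun c => (c, List.replicate n '0')))).contains c = false := by
        simp [PySem.Dict.contains_mk]; exact fun x hx h => hc (h ▸ hx)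
      have h2 : PySem.Set.add S c = S ++ [c] := by simp [PySem.Set.add, hc]
      have h3 : (PySem.Dict.mk (S.map (fun c => (c, List.replicate n '0')))).insert c (List.replicate n '0') =
          PySem.Dict.mk ((S ++ [c]).map (fun c => (c, List.replicate n '0'))) := by
        apply PySem.Dict.ext
        rw [PySem.Dict.items_insert_of_not_contains _ _ h1]
        simp
      have h4 : (S ++ [c]).Nodup := by
        simp [List.nodup_append, hS]
        exact fun a ha h => hc (h ▸ ha)
      rw [if_neg (by simp [h1]), h3, h2, ih (S ++ [c]) h4]

-- the scatter loop seen through one key: getD commutes with the modify fold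
lemma pv_getD_scatter (E : List (Int × Char)) (d : PySem.Dict Char (List Char)) (c : Char) :
    (E.foldl (fun d ip => d.modify ip.2 [] (fun m => m.set ip.1.toNat '1')) d).getD c [] =
    E.foldl (fun m ip => if c = ip.2 then m.set ip.1.toNat '1' else m) (d.getD c []) := by
  induction E generalizing d with
  | nil => rfl
  | cons ip E ih =>
    simp only [List.foldl_cons, ih, PySem.Dict.getD_modify]
    split_ifs with h
    · rw [h]
    · rfl

lemma pv_B_items (p : String) :
    preprocess_pattern_shift_and_alt p =
      (PySem.Set.ofList p.toList).map (fun s =>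
        (String.ofList [s], String.ofList (pvMaskC p.toList s))) := by
  set L := p.toList with hL
  set D := PySem.Set.ofList L with hD
  set n := L.length with hn
  have hstart : (PySem.Dict.empty : PySem.Dict Char (List Char)) =
      PySem.Dict.mk (([] : PySem.Set Char).map (fun c => (c, List.replicate n '0'))) := rfl
  have h1 : preprocess_pattern_shift_and_alt p = ((PySem.List.enumerate L).foldl
      (fun d ip => d.modify ip.2 [] (fun m => m.set ip.1.toNat '1'))
      (PySem.Dict.mk (D.map (fun c => (c, List.replicate n '0'))))).items.map
        (fun q => (String.ofList [q.1], String.ofList q.2)) := by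
    show ((PySem.List.enumerate L).foldl _
      (L.foldl (fun d c => if d.contains c then d else d.insert c (List.replicate n '0'))
        PySem.Dict.empty)).items.map _ = _
    rw [hstart, pv_B_init L n [] (List.nodup_nil), PySem.Set.update_nil_left]
  set d2 := (PySem.List.enumerate L).foldl
      (fun d ip => d.modify ip.2 [] (fun m => m.set ip.1.toNat '1'))
      (PySem.Dict.mk (D.map (fun c => (c, List.replicate n '0')))) with hd2
  have hkeys : d2.keys = D := by
    rw [hd2, PySem.Dict.keys_foldl_modify_key]
    have : (PySem.Dict.mk (D.map (fun c => (c, List.replicate n '0')))).keys = D := by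
      simp [PySem.Dict.keys, Function.comp_def]
    rw [this, PySem.List.map_snd_enumerate, hD, pv_update_self]
  have hnd : d2.keys.Nodup := by rw [hkeys]; exact PySem.Set.nodup_ofList L
  have hitems : d2.items = D.map (fun c => (c, d2.getD c [])) := by
    rw [PySem.Dict.items_eq_map_keys d2 hnd []]
    rw [hkeys]
  have hget : ∀ c ∈ D, d2.getD c [] = pvMaskC L c := by
    intro c hc
    rw [hd2, pv_getD_scatter]
    have h0 : (PySem.Dict.mk (D.map (fun c => (c, List.replicate n '0')))).getD c [] =
        List.replicate n '0' := by
      apply PySem.Dict.getD_of_mem_items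
      · exact List.mem_map_of_mem hc
      · simp [PySem.Dict.keys, Function.comp_def]; exact PySem.Set.nodup_ofList L
    rw [h0]
    rfl
  rw [h1, hitems, List.map_map]
  refine List.map_congr_left (fun c hc => ?_)
  simp [hget c hc]

-- mapping pvDig through A's int-mask fold yields B's char-mask fold
lemma pv_mask_fold_map (E : List (Int × Char)) (s : Char) (m : List Int) :
    (E.foldl (fun m ip => if s = ip.2 then m.set ip.1.toNat 1 else m) m).map pvDig =
    E.foldl (fun m ip => if s = ip.2 then m.set ip.1.toNat '1' else m) (m.map pvDig) := by
  induction E generalizing m with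
  | nil => rfl
  | cons ip E ih =>
    simp only [List.foldl_cons]
    split_ifs with h
    · rw [ih, List.map_set]; rfl
    · rw [ih]

lemma pv_mask_map (L : List Char) (s : Char) :
    (pvMaskI L s).map pvDig = pvMaskC L s := by
  unfold pvMaskI pvMaskC
  rw [pv_mask_fold_map]
  congr 1
  simp [pvDig]

lemma pv_mask_zero_one (L : List Char) (s : Char) :
    ∀ v ∈ pvMaskI L s, v = 0 ∨ v = 1 := by
  unfold pvMaskI
  generalize PySem.List.enumerate L = E
  have h0 : ∀ v ∈ List.replicate L.length (0:Int), v = 0 ∨ v = 1 := by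
    intro v hv; left; exact List.eq_of_mem_replicate hv
  generalize List.replicate L.length (0:Int) = m at h0 ⊢
  induction E generalizing m with
  | nil => exact h0
  | cons ip E ih =>
    simp only [List.foldl_cons]
    apply ih
    split_ifs with h
    · intro v hv
      rcases List.mem_or_eq_of_mem_set hv with h' | h'
      · exact h0 v h'
      · right; exact h'
    · exact h0

lemma pv_join (m : List Int) (h : ∀ v ∈ m, v = 0 ∨ v = 1) :
    PySem.Str.join "" (m.map PySem.Int.toStr) = String.ofList (m.map pvDig) := by
  apply String.toList_inj.mp
  have key : (m.map PySem.Int.toStr).map String.toList = (m.map pvDig).map (fun c => [c]) := by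
    simp only [List.map_map]
    refine List.map_congr_left (fun v hv => ?_)
    rcases h v hv with rfl | rfl <;> rfl
  simp only [pysem, key]
  simpa using PySem.Chars.join_nil_singletons (m.map pvDig)

-- ===== VERDICT (by name: the statement is the Claim_ definition above) =====
theorem preprocess_pattern_shift_and_spec : Claim_equal_preprocess_pattern_shift_and := by
  intro p _
  show _ = _
  rw [pv_A_items, pv_B_items]
  refine List.map_congr_left (fun s _ => ?_)
  rw [pv_join (pvMaskI p.toList s) (pv_mask_zero_one p.toList s), pv_mask_map]
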